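-- pv_equiv track=rewrite | github.com/hayashichiho/atcorder | app.py | replace_template
-- ===== SOURCE A (Python) =====
-- def replace_template(template_info: list[str], replacer_info: list[list[str]]) -> list[str]:
--     base_tokens = " ".join(template_info).split()  # テンプレートをスペース区切りでトークン化
--     results: list[str] = []
--
--     # 各置換ルールセットに対してテンプレートを置換
--     for rules in replacer_info:
--         current_tokens = base_tokens[:]
--
--         for i in range(0, len(rules), 2):
--             old = rules[i]
--             new = rules[i + 1]
--             current_tokens = [new if token == old else token for token in current_tokens]
--
--         # 置換後のトークンに "#" が含まれているかチェック
--         if any(token.startswith("#") for token in current_tokens):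
--             results.append("Error: Lack of data")
--         else:
--             results.append(" ".join(current_tokens))
--
--     return results
-- ===== SOURCE B (Python) =====
-- def replace_template(template_info: list[str], replacer_info: list[list[str]]) -> list[str]:
--     tokens = " ".join(template_info).split()
--
--     def final(t, pairs):
--         for old, new in pairs:
--             if t == old:
--                 t = new
--         return t
--
--     def process(toks, pairs):
--         # mapped token list, or None as soon as a '#'-token appears
--         out = []
--         for t in toks:
--             m = final(t, pairs)
--             if m.startswith("#"):
--                 return None
--             out.append(m)
--         return out
--
--     def one(rules):
--         pairs = [(rules[i], rules[i + 1]) for i in range(0, len(rules), 2)]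
--         r = process(tokens, pairs)
--         return "Error: Lack of data" if r is None else " ".join(r)
--
--     return [one(rules) for rules in replacer_info]
-- ===== Notes on version B (the rewrite author's own statement) =====
-- stated objective: alternative
-- what changed: Instead of rebuilding the whole token list once per rule and then scanning for '#' (A), B maps a per-rule-set renderer over the rule sets; each render makes one accumulator pass over the tokens, chains the whole pair list on each token, and short-circuits with None at the first '#'-token.
import Mathlib
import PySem

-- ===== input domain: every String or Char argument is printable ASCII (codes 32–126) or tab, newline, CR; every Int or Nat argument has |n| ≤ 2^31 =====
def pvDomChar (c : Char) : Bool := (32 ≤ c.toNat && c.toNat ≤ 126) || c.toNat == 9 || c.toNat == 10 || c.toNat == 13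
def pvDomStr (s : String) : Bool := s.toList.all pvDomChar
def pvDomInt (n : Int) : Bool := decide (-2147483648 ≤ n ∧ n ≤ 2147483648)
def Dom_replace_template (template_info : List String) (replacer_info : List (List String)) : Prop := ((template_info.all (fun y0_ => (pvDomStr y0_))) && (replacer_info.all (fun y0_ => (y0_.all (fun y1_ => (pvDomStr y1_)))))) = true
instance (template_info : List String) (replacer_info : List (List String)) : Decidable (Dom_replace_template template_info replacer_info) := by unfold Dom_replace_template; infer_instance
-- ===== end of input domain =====

-- B recurses over the tokens once per rule set, chaining the whole rule-pair list on each token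
-- and short-circuiting at the first '#'-token, instead of A's per-rule whole-list rebuild passes.

-- ===== PORT A =====
def replace_template (template_info : List String) (replacer_info : List (List String)) : List String :=
  let base_tokens := PySem.Str.split₀ (PySem.Str.join " " template_info)
  replacer_info.foldl (fun results rules =>
    -- for i in range(0, len(rules), 2): rules[i], rules[i+1] (pyGetD: in range under Pre_)
    let current_tokens :=
      (PySem.List.pyRange 0 (rules.length : Int) 2).foldl (fun toks i =>
        let old := PySem.List.pyGetD rules i ""
        let nw := PySem.List.pyGetD rules (i + 1) ""
        toks.map (fun token => if token == old then nw else token)) base_tokens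
    if current_tokens.any (fun token => PySem.Str.startswith token "#") then
      results ++ ["Error: Lack of data"]
    else
      results ++ [PySem.Str.join " " current_tokens]) []

-- ===== PORT B =====
-- final(t, pairs): chained run of the ordered pairs on one token
def pvFinal (pairs : List (String × String)) (t : String) : String :=
  pairs.foldl (fun v p => if v == p.1 then p.2 else v) t

-- process(toks, pairs): loop accumulating the mapped tokens, none at the first '#'-token
def pvProcess (pairs : List (String × String)) (out : List String) : List String → Option (List String)
  | [] => some out
  | t :: toks =>
    let m := pvFinal pairs t
    if PySem.Str.startswith m "#" then none
    else pvProcess pairs (out ++ [m]) toks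

def replace_template_alt (template_info : List String) (replacer_info : List (List String)) : List String :=
  let tokens := PySem.Str.split₀ (PySem.Str.join " " template_info)
  replacer_info.map (fun rules =>
    let pairs := (PySem.List.pyRange 0 (rules.length : Int) 2).map
      (fun i => (PySem.List.pyGetD rules i "", PySem.List.pyGetD rules (i + 1) ""))
    match pvProcess pairs [] tokens with
    | none => "Error: Lack of data"
    | some r => PySem.Str.join " " r)

-- ===== PRECONDITION & SPEC =====
-- Pre_ excludes rule lists of odd length: there the Python A raises IndexError at rules[i+1].
def Pre_replace_template (template_info : List String) (replacer_info : List (List String)) : Prop :=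
  ∀ rules ∈ replacer_info, rules.length % 2 = 0
instance (template_info : List String) (replacer_info : List (List String)) : Decidable (Pre_replace_template template_info replacer_info) := by unfold Pre_replace_template; infer_instance
def pvWitness_replace_template : List String × List (List String) :=
  (["a b", "c"], [["a", "x"], ["a", "#y", "#y", "z"], []])

def Spec_replace_template (template_info : List String) (replacer_info : List (List String)) (out : List String) : Prop := out = replace_template_alt template_info replacer_info
instance (template_info : List String) (replacer_info : List (List String)) (out : List String) : Decidable (Spec_replace_template template_info replacer_info out) := by unfold Spec_replace_template; infer_instance

-- ===== CLAIM (what is proved, stated in full; the proofs are below) =====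
def Claim_equal_replace_template : Prop := ∀ (template_info : List String) (replacer_info : List (List String)), Dom_replace_template template_info replacer_info → Pre_replace_template template_info replacer_info → Spec_replace_template template_info replacer_info (replace_template template_info replacer_info)

-- ===== LEMMAS AND PROOFS =====

-- folding whole-list substitution passes (A) = mapping the chained per-token substitution
theorem pvPasses_eq_map_chain (g h : Int → String) (L : List Int) (toks : List String) :
    L.foldl (fun toks i => toks.map (fun t => if t == g i then h i else t)) toks
      = toks.map (fun t => L.foldl (fun v i => if v == g i then h i else v) t) := by
  induction L generalizing toks with
  | nil => simp
  | cons i L ih =>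
    simp only [List.foldl_cons, ih, List.map_map]
    rfl

-- B's short-circuiting accumulator loop characterised by A's map-then-any shape
theorem pvProcess_eq (pairs : List (String × String)) (out toks : List String) :
    pvProcess pairs out toks
      = if (toks.map (pvFinal pairs)).any (fun m => PySem.Str.startswith m "#") then none
        else some (out ++ toks.map (pvFinal pairs)) := by
  induction toks generalizing out with
  | nil => simp [pvProcess]
  | cons t toks ih =>
    rw [pvProcess, ih, List.map_cons, List.any_cons]
    cases h1 : PySem.Str.startswith (pvFinal pairs t) "#" <;>
      cases h2 : (toks.map (pvFinal pairs)).any (fun m => PySem.Str.startswith m "#") <;>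
        simp [List.append_assoc]

-- A's foldl-append accumulator = a map over the rule sets
theorem pvFoldl_append_eq_map {α β : Type} (f : α → β) (xs : List α) (acc : List β) :
    xs.foldl (fun res x => res ++ [f x]) acc = acc ++ xs.map f := by
  induction xs generalizing acc with
  | nil => simp
  | cons x xs ih => simp [ih]

theorem replace_template_eq_alt (template_info : List String)
    (replacer_info : List (List String)) :
    replace_template template_info replacer_info
      = replace_template_alt template_info replacer_info := by
  unfold replace_template replace_template_alt
  dsimp only
  set base_tokens := PySem.Str.split₀ (PySem.Str.join " " template_info) with hbase
  have step : ∀ rules : List String,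
      (if ((PySem.List.pyRange 0 (rules.length : Int) 2).foldl (fun toks i =>
            toks.map (fun token =>
              if token == PySem.List.pyGetD rules i "" then PySem.List.pyGetD rules (i + 1) ""
              else token)) base_tokens).any (fun token => PySem.Str.startswith token "#") then
          "Error: Lack of data"
        else PySem.Str.join " "
          ((PySem.List.pyRange 0 (rules.length : Int) 2).foldl (fun toks i =>
            toks.map (fun token =>
              if token == PySem.List.pyGetD rules i "" then PySem.List.pyGetD rules (i + 1) ""
              else token)) base_tokens))
      = (fun rules =>
          match pvProcess ((PySem.List.pyRange 0 (rules.length : Int) 2).map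
              (fun i => (PySem.List.pyGetD rules i "", PySem.List.pyGetD rules (i + 1) "")))
              [] base_tokens with
          | none => "Error: Lack of data"
          | some r => PySem.Str.join " " r) rules := by
    intro rules
    have hchain := pvPasses_eq_map_chain (fun i => PySem.List.pyGetD rules i "")
      (fun i => PySem.List.pyGetD rules (i + 1) "")
      (PySem.List.pyRange 0 (rules.length : Int) 2) base_tokens
    have hfinal : (fun t => (PySem.List.pyRange 0 (rules.length : Int) 2).foldl
          (fun v i => if v == PySem.List.pyGetD rules i "" then PySem.List.pyGetD rules (i + 1) ""
            else v) t)
        = pvFinal ((PySem.List.pyRange 0 (rules.length : Int) 2).map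
            (fun i => (PySem.List.pyGetD rules i "", PySem.List.pyGetD rules (i + 1) ""))) := by
      funext t
      simp [pvFinal, List.foldl_map]
    rw [hchain, hfinal]
    dsimp only
    rw [pvProcess_eq]
    simp only [List.nil_append]
    by_cases h : ((base_tokens.map (pvFinal ((PySem.List.pyRange 0 (rules.length : Int) 2).map
        (fun i => (PySem.List.pyGetD rules i "", PySem.List.pyGetD rules (i + 1) ""))))).any
        (fun m => PySem.Str.startswith m "#")) = true
    · rw [if_pos h, if_pos h]
    · rw [if_neg h, if_neg h]
  calc replacer_info.foldl (fun results rules =>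
          if ((PySem.List.pyRange 0 (rules.length : Int) 2).foldl (fun toks i =>
                toks.map (fun token =>
                  if token == PySem.List.pyGetD rules i "" then PySem.List.pyGetD rules (i + 1) ""
                  else token)) base_tokens).any (fun token => PySem.Str.startswith token "#") then
            results ++ ["Error: Lack of data"]
          else results ++ [PySem.Str.join " "
            ((PySem.List.pyRange 0 (rules.length : Int) 2).foldl (fun toks i =>
              toks.map (fun token =>
                if token == PySem.List.pyGetD rules i "" then PySem.List.pyGetD rules (i + 1) ""
                else token)) base_tokens)]) []
      = replacer_info.foldl (fun results rules =>
          results ++ [(fun rules =>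
            match pvProcess ((PySem.List.pyRange 0 (rules.length : Int) 2).map
                (fun i => (PySem.List.pyGetD rules i "", PySem.List.pyGetD rules (i + 1) "")))
                [] base_tokens with
            | none => "Error: Lack of data"
            | some r => PySem.Str.join " " r) rules]) [] := by
        apply PySem.List.foldl_congr_mem
        intro results rules _
        rw [← step rules, ← apply_ite (fun s => results ++ [s])]
    _ = _ := by rw [pvFoldl_append_eq_map]; simp

-- ===== VERDICT (by name: the statement is the Claim_ definition above) =====
theorem replace_template_spec : Claim_equal_replace_template := by
  intro template_info replacer_info _ _
  exact replace_template_eq_alt template_info replacer_info
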